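-- pv_equiv track=rewrite | github.com/QS8459/neurounit_task | src/utils/scraper.py | generate_placeholder
-- ===== SOURCE A (Python) =====
-- def generate_placeholder(num_records: int = 0, num_fields_per_record: int = 0):
--     placeholder: str = ''
--     for i in range(num_records):
--         placeholder += '('
--         for j in range(1, num_fields_per_record + 1):
--             placeholder += f"${i * num_fields_per_record + j}" + (', ' if j < num_fields_per_record else '')
--         placeholder += ')' + (', ' if i + 1 < num_records else '')
--
--     return placeholder
-- ===== SOURCE B (Python) =====
-- def generate_placeholder(num_records: int = 0, num_fields_per_record: int = 0):
--     groups = []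
--     next_num = 1
--     for _ in range(num_records):
--         fields = range(next_num, next_num + num_fields_per_record)
--         next_num += len(fields)
--         groups.append('(' + ', '.join(f'${x}' for x in fields) + ')')
--     return ', '.join(groups)
-- ===== Notes on version B (the rewrite author's own statement) =====
-- stated objective: simpler
-- what changed: B builds one group string per record with a running field counter and assembles the result with ', '.join twice, instead of A's character-by-character accumulation with nested loops, i*num_fields+j index arithmetic and in-loop comma conditionals.
import Mathlib
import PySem

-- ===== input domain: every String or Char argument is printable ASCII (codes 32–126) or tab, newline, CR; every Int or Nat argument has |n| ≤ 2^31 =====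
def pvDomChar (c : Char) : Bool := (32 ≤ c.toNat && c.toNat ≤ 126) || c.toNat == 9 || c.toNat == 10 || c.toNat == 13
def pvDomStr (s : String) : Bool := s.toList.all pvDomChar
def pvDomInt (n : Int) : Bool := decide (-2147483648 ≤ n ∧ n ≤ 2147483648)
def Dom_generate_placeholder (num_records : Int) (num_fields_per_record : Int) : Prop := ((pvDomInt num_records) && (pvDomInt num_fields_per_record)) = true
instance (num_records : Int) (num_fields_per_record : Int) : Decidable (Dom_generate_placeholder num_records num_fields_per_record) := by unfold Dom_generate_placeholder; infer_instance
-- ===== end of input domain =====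

-- B rebuilds the result as a ', '.join of per-record groups numbered by a running counter
-- instead of A's character-by-character accumulation with i*num_fields+j arithmetic (objective: simpler).
-- Both functions are total; A = B everywhere.

-- ===== PORT A =====
-- literal transliteration of A's nested string-accumulating loops
def generate_placeholder (num_records : Int) (num_fields_per_record : Int) : String :=
  (PySem.List.pyRange 0 num_records 1).foldl (fun placeholder i =>
    let placeholder := placeholder ++ "("
    let placeholder := (PySem.List.pyRange 1 (num_fields_per_record + 1) 1).foldl
      (fun p j => p ++ ("$" ++ PySem.Int.toStr (i * num_fields_per_record + j) ++
        (if j < num_fields_per_record then ", " else ""))) placeholder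
    placeholder ++ (")" ++ (if i + 1 < num_records then ", " else ""))) ""

-- ===== PORT B =====
-- '(' + ', '.join(f'${x}' for x in fields) + ')'
def pvGroup (fields : List Int) : String :=
  "(" ++ PySem.Str.join ", " (fields.map (fun x => "$" ++ PySem.Int.toStr x)) ++ ")"

-- the loop of B: one group per record, fields taken from a running counter
def pvAltGroups : Nat → Int → Int → List String
  | 0, _, _ => []
  | m + 1, nextNum, f =>
    let fields := PySem.List.pyRange nextNum (nextNum + f) 1
    pvGroup fields :: pvAltGroups m (nextNum + fields.length) f

def generate_placeholder_alt (num_records : Int) (num_fields_per_record : Int) : String :=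
  PySem.Str.join ", " (pvAltGroups num_records.toNat 1 num_fields_per_record)

-- ===== PRECONDITION & SPEC =====
def Spec_generate_placeholder (num_records : Int) (num_fields_per_record : Int) (out : String) : Prop := out = generate_placeholder_alt num_records num_fields_per_record
instance (num_records : Int) (num_fields_per_record : Int) (out : String) : Decidable (Spec_generate_placeholder num_records num_fields_per_record out) := by unfold Spec_generate_placeholder; infer_instance

-- ===== CLAIM (what is proved, stated in full; the proofs are below) =====
def Claim_equal_generate_placeholder : Prop := ∀ (num_records : Int) (num_fields_per_record : Int), Dom_generate_placeholder num_records num_fields_per_record → Spec_generate_placeholder num_records num_fields_per_record (generate_placeholder num_records num_fields_per_record)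

-- ===== LEMMAS AND PROOFS =====

-- a fold that appends "piece ++ ', '" for every element is the flattening of the comma-suffixed pieces
lemma pvCommaFold {β : Type} (g : β → List Char) :
    ∀ (l : List β) (acc : List Char),
      l.foldl (fun a t => a ++ g t ++ [',', ' ']) acc
        = acc ++ (l.map (fun t => g t ++ [',', ' '])).flatten := by
  intro l
  induction l with
  | nil => simp
  | cons x xs ih => intro acc; simp [List.append_assoc]

lemma pvJoinSnoc (l : List (List Char)) (x : List Char) :
    PySem.Chars.join [',', ' '] (l ++ [x])
      = (l.map (fun s => s ++ [',', ' '])).flatten ++ x := by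
  induction l with
  | nil => simp [PySem.Chars.join_singleton]
  | cons a l ih =>
    cases l with
    | nil => simp [PySem.Chars.join_cons_cons, PySem.Chars.join_singleton]
    | cons b l' =>
      simp only [List.cons_append, PySem.Chars.join_cons_cons] at ih ⊢
      simp [ih, List.append_assoc]

-- the "comma unless last" fold over range m is exactly ', '.join of the pieces
lemma pvSepFold (g : Nat → List Char) (m : Nat) (acc : List Char) :
    (List.range m).foldl (fun a t => a ++ g t ++ (if t + 1 < m then [',', ' '] else [])) acc
      = acc ++ PySem.Chars.join [',', ' '] ((List.range m).map g) := by
  induction m with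
  | zero => simp [PySem.Chars.join_nil]
  | succ m _ =>
    rw [List.range_succ, List.foldl_append, List.map_append]
    rw [PySem.List.foldl_congr_mem (List.range m) _ (fun a t => a ++ g t ++ [',', ' ']) acc
      (by intro a t ht; rw [if_pos]; have := List.mem_range.mp ht; omega)]
    rw [pvCommaFold]
    simp [pvJoinSnoc, Function.comp_def, List.append_assoc]

-- A's inner field loop, seen on the character level
lemma pvInner_toList (i f : Int) (s : String) :
    ((List.range f.toNat).foldl (fun p (t : Nat) =>
        p ++ ("$" ++ PySem.Int.toStr (i * f + (1 + (t : Int))) ++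
          (if (1 + (t : Int)) < f then ", " else ""))) s).toList
      = s.toList ++ PySem.Chars.join [',', ' ']
          ((List.range f.toNat).map (fun (t : Nat) =>
            '$' :: PySem.Int.toChars (i * f + (1 + (t : Int))))) := by
  rw [← List.foldl_hom (f := String.toList)
      (g₁ := fun p (t : Nat) => p ++ ("$" ++ PySem.Int.toStr (i * f + (1 + (t : Int))) ++
        (if (1 + (t : Int)) < f then ", " else "")))
      (g₂ := fun a (t : Nat) => a ++ ('$' :: PySem.Int.toChars (i * f + (1 + (t : Int)))) ++
        (if t + 1 < f.toNat then [',', ' '] else []))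
      (init := s)]
  · exact pvSepFold (fun (t : Nat) => '$' :: PySem.Int.toChars (i * f + (1 + (t : Int)))) f.toNat s.toList
  · intro p t
    have hite : (if t + 1 < f.toNat then ([',', ' '] : List Char) else [])
        = (if (1 + (t : Int)) < f then [',', ' '] else []) :=
      if_congr (by omega) rfl rfl
    rw [hite]
    simp [String.toList_append, PySem.Int.toList_toStr, apply_ite String.toList,
      List.append_assoc]

-- A's whole output, on the character level: a ', '.join of parenthesised groups
lemma pvA_toList (n f : Int) :
    (generate_placeholder n f).toList
      = PySem.Chars.join [',', ' '] ((List.range n.toNat).map (fun (i : Nat) =>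
          '(' :: PySem.Chars.join [',', ' ']
            ((List.range f.toNat).map (fun (t : Nat) =>
              '$' :: PySem.Int.toChars ((i : Int) * f + (1 + (t : Int))))) ++ [')'])) := by
  unfold generate_placeholder
  rw [PySem.List.pyRange_one 0 n, List.foldl_map]
  simp only [Int.sub_zero, Int.zero_add]
  rw [← List.foldl_hom (f := String.toList)
      (g₂ := fun a (i : Nat) => a ++ ('(' :: PySem.Chars.join [',', ' ']
          ((List.range f.toNat).map (fun (t : Nat) =>
            '$' :: PySem.Int.toChars ((i : Int) * f + (1 + (t : Int))))) ++ [')']) ++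
        (if i + 1 < n.toNat then [',', ' '] else []))
      (init := "")]
  · exact pvSepFold _ n.toNat _
  · intro p i
    rw [PySem.List.pyRange_one 1 (f + 1), List.foldl_map]
    simp only [add_sub_cancel_right]
    simp only [String.toList_append, apply_ite String.toList]
    rw [pvInner_toList (i : Int) f (p ++ "(")]
    have hite : (if i + 1 < n.toNat then ([',', ' '] : List Char) else [])
        = (if ((i : Nat) : Int) + 1 < n then [',', ' '] else []) :=
      if_congr (by omega) rfl rfl
    rw [hite]
    simp [String.toList_append, List.append_assoc]

-- B's loop in closed form: record r's fields start at k + r * max(f,0)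
lemma pvAltGroups_closed (f : Int) :
    ∀ (m : Nat) (k : Int),
      pvAltGroups m k f = (List.range m).map (fun (r : Nat) =>
        pvGroup (PySem.List.pyRange (k + (r : Int) * (f.toNat : Int))
          (k + (r : Int) * (f.toNat : Int) + f) 1)) := by
  intro m
  induction m with
  | zero => intro k; simp [pvAltGroups]
  | succ m ih =>
    intro k
    rw [List.range_succ_eq_map]
    simp only [pvAltGroups, PySem.List.length_pyRange_one, add_sub_cancel_left,
      List.map_cons, List.map_map, Nat.cast_zero, Int.zero_mul, Int.add_zero]
    rw [ih (k + (f.toNat : Int))]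
    refine congrArg₂ _ rfl ?_
    refine List.map_congr_left (fun r _ => ?_)
    simp only [Function.comp_def, Nat.succ_eq_add_one]
    have h1 : k + (f.toNat : Int) + (r : Int) * (f.toNat : Int)
        = k + (((r + 1 : Nat)) : Int) * (f.toNat : Int) := by push_cast; ring
    rw [h1]

-- the two group builders produce the same characters
lemma pvGroup_eq (i : Nat) (f : Int) :
    (pvGroup (PySem.List.pyRange (1 + (i : Int) * (f.toNat : Int))
        (1 + (i : Int) * (f.toNat : Int) + f) 1)).toList
      = '(' :: PySem.Chars.join [',', ' ']
          ((List.range f.toNat).map (fun (t : Nat) =>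
            '$' :: PySem.Int.toChars ((i : Int) * f + (1 + (t : Int))))) ++ [')'] := by
  have hrange : PySem.List.pyRange (1 + (i : Int) * (f.toNat : Int))
      (1 + (i : Int) * (f.toNat : Int) + f) 1
      = (List.range f.toNat).map (fun (k : Nat) => 1 + (i : Int) * (f.toNat : Int) + (k : Int)) := by
    rw [PySem.List.pyRange_one, add_sub_cancel_left]
  rw [pvGroup, hrange, List.map_map]
  have hmaps : (List.range f.toNat).map
        (((fun x => "$" ++ PySem.Int.toStr x)) ∘ (fun (k : Nat) => 1 + (i : Int) * (f.toNat : Int) + (k : Int)))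
      = (List.range f.toNat).map
        (fun (t : Nat) => "$" ++ PySem.Int.toStr ((i : Int) * f + (1 + (t : Int)))) := by
    refine List.map_congr_left (fun t ht => ?_)
    have harg : (1 + (i : Int) * (max f 0) + (t : Int)) = ((i : Int) * f + (1 + (t : Int))) := by
      have hm : max f 0 = f := by
        have := List.mem_range.mp ht; omega
      rw [hm]; ring
    simp [harg]
  rw [hmaps]
  simp [String.toList_append, PySem.Str.toList_join, List.map_map, Function.comp_def,
    PySem.Int.toList_toStr]

-- ===== VERDICT (by name: the statement is the Claim_ definition above) =====
theorem generate_placeholder_spec : Claim_equal_generate_placeholder := by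
  intro n f _
  unfold Spec_generate_placeholder
  apply String.toList_inj.mp
  rw [pvA_toList]
  unfold generate_placeholder_alt
  rw [pvAltGroups_closed f n.toNat 1, PySem.Str.toList_join, List.map_map]
  refine congrArg _ (List.map_congr_left (fun i _ => ?_))
  exact (pvGroup_eq i f).symm
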